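-- pv_equiv track=rewrite | github.com/daniel-e/moving_tables | table_io.py | load_escape
-- ===== SOURCE A (Python) =====
-- def load_escape(f):
--     e = []
--     cnt = []
--     for i in f:
--         l = [c for c in i.rstrip()]
--         if len(l) > 0:
--             e.append(l)
--     for (ypos, l) in enumerate(e):
--         for (xpos, c) in enumerate(l):
--             if c == 'c':
--                 cnt = [xpos, ypos]
--     return (e, cnt)
-- ===== SOURCE B (Python) =====
-- def load_escape(f):
--     e = [l for l in (list(i.rstrip()) for i in f) if l]
--     for ypos, row in reversed(list(enumerate(e))):
--         for xpos, ch in reversed(list(enumerate(row))):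
--             if ch == 'c':
--                 return (e, [xpos, ypos])
--     return (e, [])
-- ===== Notes on version B (the rewrite author's own statement) =====
-- stated objective: alternative
-- what changed: replaces A's overwrite-on-every-match forward double loop over the whole grid with a bottom-up, right-to-left search that returns at the first 'c' found
import Mathlib
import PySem

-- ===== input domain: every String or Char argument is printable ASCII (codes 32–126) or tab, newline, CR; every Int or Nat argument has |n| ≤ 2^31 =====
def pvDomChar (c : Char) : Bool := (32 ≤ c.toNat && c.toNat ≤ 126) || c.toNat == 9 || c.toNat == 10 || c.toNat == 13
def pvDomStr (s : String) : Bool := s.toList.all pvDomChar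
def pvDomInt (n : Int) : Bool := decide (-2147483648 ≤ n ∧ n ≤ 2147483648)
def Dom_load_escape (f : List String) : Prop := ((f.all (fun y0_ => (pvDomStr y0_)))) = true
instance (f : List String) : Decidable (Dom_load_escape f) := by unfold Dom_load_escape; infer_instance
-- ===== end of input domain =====

-- B replaces A's overwrite-on-every-match forward double loop by a bottom-up right-to-left
-- search with an early return (alternative decomposition; return value identical).

-- ===== PORT A =====
def load_escape (f : List String) : List (List String) × List Int :=
  let e := f.foldl (fun e i =>
    let l := (PySem.Str.rstrip i).toList.map (fun c => String.mk [c])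
    if l.length > 0 then e ++ [l] else e) []
  let cnt := (PySem.List.enumerate e).foldl (fun cnt yl =>
    (PySem.List.enumerate yl.2).foldl (fun cnt xc =>
      if xc.2 == "c" then [xc.1, yl.1] else cnt) cnt) []
  (e, cnt)

-- ===== PORT B =====
-- inner loop of B: first 'c' in the (already reversed) enumerated row
def pvScanRowB : List (Int × String) → Option Int
  | [] => none
  | (x, c) :: rest => if c == "c" then some x else pvScanRowB rest

-- outer loop of B over the (already reversed) enumerated rows, early return
def pvScanRowsB : List (Int × List String) → List Int
  | [] => []
  | (y, row) :: rest =>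
    match pvScanRowB ((PySem.List.enumerate row).reverse) with
    | some x => [x, y]
    | none => pvScanRowsB rest

def load_escape_alt (f : List String) : List (List String) × List Int :=
  let e := (f.map (fun i => (PySem.Str.rstrip i).toList.map (fun c => String.mk [c]))).filter
    (fun l => l.length > 0)
  (e, pvScanRowsB ((PySem.List.enumerate e).reverse))

-- ===== PRECONDITION & SPEC =====
def Spec_load_escape (f : List String) (out : List (List String) × List Int) : Prop := out = load_escape_alt f
instance (f : List String) (out : List (List String) × List Int) : Decidable (Spec_load_escape f out) := by unfold Spec_load_escape; infer_instance

-- ===== CLAIM (what is proved, stated in full; the proofs are below) =====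
def Claim_equal_load_escape : Prop := ∀ (f : List String), Dom_load_escape f → Spec_load_escape f (load_escape f)

-- ===== LEMMAS AND PROOFS =====

-- proof-side optional variant of pvScanRowsB
def pvOptRows : List (Int × List String) → Option (List Int)
  | [] => none
  | (y, row) :: rest =>
    match pvScanRowB ((PySem.List.enumerate row).reverse) with
    | some x => some [x, y]
    | none => pvOptRows rest

lemma pvScanRowB_append_singleton (l : List (Int × String)) (x : Int) (c : String) :
    pvScanRowB (l ++ [(x, c)]) =
      match pvScanRowB l with
      | some x' => some x'
      | none => if c == "c" then some x else none := by
  induction l with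
  | nil => simp [pvScanRowB]
  | cons p rest ih =>
    obtain ⟨x', c'⟩ := p
    by_cases h : c' == "c" <;> simp [pvScanRowB, h, ih]

lemma pvInner_eq (y : Int) (ps : List (Int × String)) (acc : List Int) :
    ps.foldl (fun cnt xc => if xc.2 == "c" then [xc.1, y] else cnt) acc =
      match pvScanRowB ps.reverse with
      | some x => [x, y]
      | none => acc := by
  induction ps generalizing acc with
  | nil => simp [pvScanRowB]
  | cons p rest ih =>
    obtain ⟨x, c⟩ := p
    simp only [List.foldl_cons, List.reverse_cons, pvScanRowB_append_singleton, ih]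
    cases pvScanRowB rest.reverse with
    | none => by_cases h : c == "c" <;> simp [h]
    | some x' => rfl

lemma pvOptRows_append_singleton (l : List (Int × List String)) (y : Int) (row : List String) :
    pvOptRows (l ++ [(y, row)]) =
      match pvOptRows l with
      | some r => some r
      | none =>
        match pvScanRowB ((PySem.List.enumerate row).reverse) with
        | some x => some [x, y]
        | none => none := by
  induction l with
  | nil =>
    simp only [List.nil_append, pvOptRows]
  | cons p rest ih =>
    obtain ⟨y', row'⟩ := p
    simp only [List.cons_append, pvOptRows, ih]
    cases pvScanRowB ((PySem.List.enumerate row').reverse) <;> rfl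

lemma pvScanRowsB_eq_optRows (qs : List (Int × List String)) :
    pvScanRowsB qs = match pvOptRows qs with | some r => r | none => [] := by
  induction qs with
  | nil => rfl
  | cons p rest ih =>
    obtain ⟨y, row⟩ := p
    simp only [pvScanRowsB, pvOptRows, ih]
    cases pvScanRowB ((PySem.List.enumerate row).reverse) <;> rfl

lemma pvOuter_eq (qs : List (Int × List String)) (acc : List Int) :
    qs.foldl (fun cnt yl =>
        (PySem.List.enumerate yl.2).foldl (fun cnt xc =>
          if xc.2 == "c" then [xc.1, yl.1] else cnt) cnt) acc =
      match pvOptRows qs.reverse with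
      | some r => r
      | none => acc := by
  induction qs generalizing acc with
  | nil => simp [pvOptRows]
  | cons p rest ih =>
    obtain ⟨y, row⟩ := p
    rw [List.foldl_cons, ih, List.reverse_cons, pvOptRows_append_singleton, pvInner_eq]
    cases pvOptRows rest.reverse <;> cases pvScanRowB ((PySem.List.enumerate row).reverse) <;> rfl

lemma pvGridAux (g : String → List String) (f : List String) :
    ∀ acc, f.foldl (fun e i => let l := g i; if l.length > 0 then e ++ [l] else e) acc =
      acc ++ (f.map g).filter (fun l => l.length > 0) := by
  induction f with
  | nil => simp
  | cons i rest ih =>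
    intro acc
    simp only [List.foldl_cons, List.map_cons, List.filter_cons]
    by_cases h : (g i).length > 0 <;> simp [h, ih]

lemma pvGrid_eq (f : List String) :
    f.foldl (fun e i =>
        let l := (PySem.Str.rstrip i).toList.map (fun c => String.mk [c])
        if l.length > 0 then e ++ [l] else e) [] =
      (f.map (fun i => (PySem.Str.rstrip i).toList.map (fun c => String.mk [c]))).filter
        (fun l => l.length > 0) := by
  rw [pvGridAux (fun i => (PySem.Str.rstrip i).toList.map (fun c => String.mk [c])) f []]
  simp

-- ===== VERDICT (by name: the statement is the Claim_ definition above) =====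
theorem load_escape_spec : Claim_equal_load_escape := by
  intro f _
  unfold Spec_load_escape load_escape load_escape_alt
  simp only [pvGrid_eq, pvOuter_eq, pvScanRowsB_eq_optRows]
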